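-- pv_equiv track=rewrite | github.com/AndreiCautisanu/AG | Tema 3/main.py | checkUnsatisfiedClauses
-- ===== SOURCE A (Python) =====
-- def checkUnsatisfiedClauses(clauses, sol):
--     # unsatClauses = deepcopy(clauses)
--
--     # for lit in sol:
--     #     i = 0
--     #     while i < len(unsatClauses):
--     #         if lit in unsatClauses[i]:
--     #             unsatClauses.remove(unsatClauses[i])
--     #         else:
--     #             i = i + 1
--
--     # return len(unsatClauses)
--
--     satisfiedClausesNo = 0
--
--     for clause in clauses:
--         for lit in clause:
--             if lit in sol:
--                 satisfiedClausesNo += 1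
--                 break
--
--     return len(clauses) - satisfiedClausesNo
-- ===== SOURCE B (Python) =====
-- def checkUnsatisfiedClauses(clauses, sol):
--     # Inverted index: literal -> set of indices of clauses containing it,
--     # then union over sol's literals to get the satisfied clause indices.
--     lit2idx = {}
--     for i, clause in enumerate(clauses):
--         for lit in clause:
--             lit2idx.setdefault(lit, set()).add(i)
--     satisfied = set()
--     for lit in sol:
--         satisfied |= lit2idx.get(lit, set())
--     return len(clauses) - len(satisfied)
-- ===== Notes on version B (the rewrite author's own statement) =====
-- stated objective: faster
-- what changed: Instead of scanning each clause and testing each literal for membership in the list sol (a linear scan per literal), B builds an inverted index from literals to clause-index sets in one pass and unions the index sets of sol's literals into a satisfied-index set, returning len(clauses) minus its size.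
import Mathlib
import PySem

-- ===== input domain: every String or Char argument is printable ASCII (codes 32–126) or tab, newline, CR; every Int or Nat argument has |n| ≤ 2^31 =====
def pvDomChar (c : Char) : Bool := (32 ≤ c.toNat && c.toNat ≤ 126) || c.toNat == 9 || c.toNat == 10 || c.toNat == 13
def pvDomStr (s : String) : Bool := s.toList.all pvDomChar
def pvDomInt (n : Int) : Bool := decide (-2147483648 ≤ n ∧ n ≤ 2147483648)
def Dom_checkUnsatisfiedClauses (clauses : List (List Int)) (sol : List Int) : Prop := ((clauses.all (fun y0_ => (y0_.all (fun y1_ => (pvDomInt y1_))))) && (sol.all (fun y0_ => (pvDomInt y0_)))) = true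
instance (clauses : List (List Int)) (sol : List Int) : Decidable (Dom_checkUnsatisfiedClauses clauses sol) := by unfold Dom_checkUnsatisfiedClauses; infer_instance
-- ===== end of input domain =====

-- B replaces A's clause-by-clause scan (membership test on sol inside the inner loop) with an
-- inverted literal→clause-index map unioned over sol's literals; alternative algorithm, same results.


-- ===== PORT A =====
-- inner 'for lit in clause: if lit in sol: …; break' loop of A
def clauseHitsSol (sol : List Int) : List Int → Bool
  | [] => false
  | lit :: rest => if sol.contains lit then true else clauseHitsSol sol rest

def checkUnsatisfiedClauses (clauses : List (List Int)) (sol : List Int) : Int :=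
  let satisfiedClausesNo : Int :=
    clauses.foldl (fun acc clause => if clauseHitsSol sol clause then acc + 1 else acc) 0
  (clauses.length : Int) - satisfiedClausesNo

-- ===== PORT B =====
-- lit2idx: literal -> set of indices of clauses containing it (first loop of Source B)
def buildLitIndex (clauses : List (List Int)) : PySem.Dict Int (PySem.Set Int) :=
  (PySem.List.enumerate clauses).foldl
    (fun d p => p.2.foldl
      (fun d' lit => d'.modify lit PySem.Set.empty (fun s => PySem.Set.add s p.1)) d)
    PySem.Dict.empty

def checkUnsatisfiedClauses_alt (clauses : List (List Int)) (sol : List Int) : Int :=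
  let lit2idx := buildLitIndex clauses
  let satisfied : PySem.Set Int :=
    sol.foldl (fun s lit => PySem.Set.union s (lit2idx.getD lit PySem.Set.empty)) PySem.Set.empty
  (clauses.length : Int) - PySem.Set.len satisfied

-- ===== PRECONDITION & SPEC =====
def Spec_checkUnsatisfiedClauses (clauses : List (List Int)) (sol : List Int) (out : Int) : Prop := out = checkUnsatisfiedClauses_alt clauses sol
instance (clauses : List (List Int)) (sol : List Int) (out : Int) : Decidable (Spec_checkUnsatisfiedClauses clauses sol out) := by unfold Spec_checkUnsatisfiedClauses; infer_instance

-- ===== CLAIM (what is proved, stated in full; the proofs are below) =====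
def Claim_equal_checkUnsatisfiedClauses : Prop := ∀ (clauses : List (List Int)) (sol : List Int), Dom_checkUnsatisfiedClauses clauses sol → Spec_checkUnsatisfiedClauses clauses sol (checkUnsatisfiedClauses clauses sol)

-- ===== LEMMAS AND PROOFS =====

-- A's inner break-loop is an 'any' over the clause
theorem clauseHitsSol_eq_any (sol c : List Int) :
    clauseHitsSol sol c = c.any (fun lit => sol.contains lit) := by
  induction c with
  | nil => rfl
  | cons l t ih => by_cases h : l ∈ sol <;> simp [clauseHitsSol, h, ih]

-- membership after B's inner fold (one clause's literals, all tagged with index i)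
theorem mem_inner_fold (lits : List Int) (d : PySem.Dict Int (PySem.Set Int)) (i j lit : Int) :
    j ∈ (lits.foldl (fun d' l => d'.modify l PySem.Set.empty (fun s => PySem.Set.add s i)) d).getD lit PySem.Set.empty
      ↔ j ∈ d.getD lit PySem.Set.empty ∨ (lit ∈ lits ∧ j = i) := by
  induction lits generalizing d with
  | nil => simp
  | cons l t ih =>
    simp only [List.foldl_cons, ih, PySem.Dict.getD_modify]
    by_cases h : lit = l
    · subst h; simp [PySem.Set.mem_add]; tauto
    · simp [h]

-- membership after B's outer fold over enumerated clauses
theorem mem_outer_fold (ps : List (Int × List Int)) (d : PySem.Dict Int (PySem.Set Int)) (j lit : Int) :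
    j ∈ (ps.foldl (fun d p => p.2.foldl
          (fun d' l => d'.modify l PySem.Set.empty (fun s => PySem.Set.add s p.1)) d) d).getD lit PySem.Set.empty
      ↔ j ∈ d.getD lit PySem.Set.empty ∨ ∃ p ∈ ps, lit ∈ p.2 ∧ j = p.1 := by
  induction ps generalizing d with
  | nil => simp
  | cons p t ih =>
    simp only [List.foldl_cons, ih, mem_inner_fold]
    constructor
    · rintro (((h | ⟨h1, h2⟩) | ⟨q, hq, h1, h2⟩))
      · exact Or.inl h
      · exact Or.inr ⟨p, by simp, h1, h2⟩
      · exact Or.inr ⟨q, by simp [hq], h1, h2⟩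
    · rintro (h | ⟨q, hq, h1, h2⟩)
      · exact Or.inl (Or.inl h)
      · rcases List.mem_cons.mp hq with rfl | hq
        · exact Or.inl (Or.inr ⟨h1, h2⟩)
        · exact Or.inr ⟨q, hq, h1, h2⟩

theorem mem_buildLitIndex (clauses : List (List Int)) (j lit : Int) :
    j ∈ (buildLitIndex clauses).getD lit PySem.Set.empty
      ↔ ∃ p ∈ PySem.List.enumerate clauses, lit ∈ p.2 ∧ j = p.1 := by
  unfold buildLitIndex
  rw [mem_outer_fold]
  simp [PySem.Dict.getD_empty, PySem.Set.empty]

-- membership after B's union fold over sol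
theorem mem_sat_fold (D : PySem.Dict Int (PySem.Set Int)) (sol : List Int) (acc : PySem.Set Int) (j : Int) :
    j ∈ sol.foldl (fun s l => PySem.Set.union s (D.getD l PySem.Set.empty)) acc
      ↔ j ∈ acc ∨ ∃ l ∈ sol, j ∈ D.getD l PySem.Set.empty := by
  induction sol generalizing acc with
  | nil => simp
  | cons l t ih =>
    simp only [List.foldl_cons, ih, PySem.Set.mem_union]
    constructor
    · rintro ((h | h) | ⟨m, hm, h⟩)
      · exact Or.inl h
      · exact Or.inr ⟨l, by simp, h⟩
      · exact Or.inr ⟨m, by simp [hm], h⟩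
    · rintro (h | ⟨m, hm, h⟩)
      · exact Or.inl (Or.inl h)
      · rcases List.mem_cons.mp hm with rfl | hm
        · exact Or.inl (Or.inr h)
        · exact Or.inr ⟨m, hm, h⟩

theorem nodup_sat_fold (D : PySem.Dict Int (PySem.Set Int)) (sol : List Int) (acc : PySem.Set Int)
    (h : acc.Nodup) :
    (sol.foldl (fun s l => PySem.Set.union s (D.getD l PySem.Set.empty)) acc).Nodup := by
  induction sol generalizing acc with
  | nil => exact h
  | cons l t ih => exact ih _ (PySem.Set.nodup_union _ _ h)

-- ===== VERDICT (by name: the statement is the Claim_ definition above) =====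
theorem checkUnsatisfiedClauses_spec : Claim_equal_checkUnsatisfiedClauses := by
  intro clauses sol _
  unfold Spec_checkUnsatisfiedClauses checkUnsatisfiedClauses checkUnsatisfiedClauses_alt
  -- the satisfied-index list on B's side
  set satisfied := sol.foldl (fun s lit => PySem.Set.union s ((buildLitIndex clauses).getD lit PySem.Set.empty)) PySem.Set.empty with hsat
  -- the canonical list of satisfied clause indices
  set S := ((PySem.List.enumerate clauses).filter (fun p => p.2.any (fun lit => sol.contains lit))).map (fun p => p.1) with hS
  have hmem : ∀ j, j ∈ satisfied ↔ j ∈ S := by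
    intro j
    rw [hsat, mem_sat_fold]
    constructor
    · rintro (h | ⟨l, hl, h⟩)
      · exact absurd h (by simp [PySem.Set.empty])
      · rw [mem_buildLitIndex] at h
        obtain ⟨p, hp, hlp, hj⟩ := h
        simp only [hS, List.mem_map, List.mem_filter]
        exact ⟨p, ⟨hp, List.any_eq_true.mpr ⟨l, hlp, by simpa using hl⟩⟩, hj.symm⟩
    · intro hjS
      simp only [hS, List.mem_map, List.mem_filter] at hjS
      obtain ⟨p, ⟨hp, hany⟩, hj⟩ := hjS
      obtain ⟨l, hl, hc⟩ := List.any_eq_true.mp hany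
      exact Or.inr ⟨l, by simpa using hc, (mem_buildLitIndex clauses j l).mpr ⟨p, hp, hl, hj.symm⟩⟩
  have hndS : S.Nodup := by
    have hp : S.Pairwise (· < ·) := by
      rw [hS, List.pairwise_map]
      exact List.Pairwise.sublist List.filter_sublist (PySem.List.pairwise_lt_enumerate clauses 0)
    exact hp.imp (fun h => ne_of_lt h)
  have hnds : satisfied.Nodup := nodup_sat_fold _ _ _ (List.nodup_nil)
  have hlen : satisfied.length = S.length :=
    ((List.perm_ext_iff_of_nodup hnds hndS).mpr hmem).length_eq
  have hcount : clauses.foldl (fun acc clause => if clauseHitsSol sol clause then acc + 1 else acc) 0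
      = (PySem.Set.len satisfied : Int) := by
    have h1 : clauses.foldl (fun acc clause => if clauseHitsSol sol clause then acc + 1 else acc) (0 : Int)
        = (clauses.countP (fun c => c.any (fun lit => sol.contains lit)) : Int) := by
      have := PySem.List.foldl_count_if (fun c => c.any (fun lit => sol.contains lit)) clauses 0
      simp only [clauseHitsSol_eq_any]
      omega
    have h2 : S.length = clauses.countP (fun c => c.any (fun lit => sol.contains lit)) := by
      rw [hS, List.length_map, ← List.countP_eq_length_filter]
      conv_rhs => rw [← PySem.List.map_snd_enumerate clauses 0]
      rw [List.countP_map]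
      rfl
    simp only [PySem.Set.len, hlen, h2, h1]
  rw [hcount]
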